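-- pv_equiv track=rewrite | github.com/paiml/depyler | examples/hard_final_sec_caesar.py | frequency_score
-- ===== SOURCE A (Python) =====
-- def frequency_score(text: list[int]) -> int:
--     """Score text by English-like frequency distribution (higher = more English-like).
--
--     Uses simplified frequency: e(4)=100, t(19)=90, a(0)=80, o(14)=70, etc.
--     """
--     freqs: list[int] = []
--     j: int = 0
--     while j < 26:
--         freqs.append(0)
--         j = j + 1
--     i: int = 0
--     while i < len(text):
--         tv: int = text[i]
--         old: int = freqs[tv]
--         freqs[tv] = old + 1
--         i = i + 1
--     score: int = 0
--     e_freq: int = freqs[4]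
--     t_freq: int = freqs[19]
--     a_freq: int = freqs[0]
--     score = e_freq * 100 + t_freq * 90 + a_freq * 80
--     return score
-- ===== SOURCE B (Python) =====
-- _WEIGHTS = [80, 0, 0, 0, 100] + [0] * 14 + [90] + [0] * 6  # length 26: a=80, e=100, t=90
--
-- def frequency_score(text: list[int]) -> int:
--     score = 0
--     for tv in text:
--         score += _WEIGHTS[tv]
--     return score
-- ===== Notes on version B (the rewrite author's own statement) =====
-- stated objective: simpler
-- what changed: B drops the 26-bucket histogram and the separate select/combine step: it accumulates the score in a single pass over the text via a fixed 26-entry weight table (w[0]=80, w[4]=100, w[19]=90, else 0).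
import Mathlib
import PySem

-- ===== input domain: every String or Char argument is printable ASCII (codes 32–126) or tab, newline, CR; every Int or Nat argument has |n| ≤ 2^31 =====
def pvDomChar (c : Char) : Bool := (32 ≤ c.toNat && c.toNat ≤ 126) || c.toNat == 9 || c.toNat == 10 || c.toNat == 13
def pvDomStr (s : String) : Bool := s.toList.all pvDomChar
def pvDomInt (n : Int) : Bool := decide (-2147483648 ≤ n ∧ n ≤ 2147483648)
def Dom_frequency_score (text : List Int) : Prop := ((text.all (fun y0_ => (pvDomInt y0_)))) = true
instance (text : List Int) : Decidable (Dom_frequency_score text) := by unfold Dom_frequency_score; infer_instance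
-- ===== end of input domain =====

-- B replaces A's 26-bucket histogram + select/combine step by a single pass that adds a
-- fixed 26-entry weight-table lookup per element (objective: simpler).


-- ===== PORT A =====
def frequency_score (text : List Int) : Int :=
  -- while j < 26: freqs.append(0)
  let freqs : List Int := (PySem.List.pyRange 0 26 1).foldl (fun fs _ => fs ++ [(0 : Int)]) []
  -- while i < len(text): freqs[tv] = freqs[tv] + 1
  let freqs : List Int :=
    text.foldl (fun fs tv => PySem.List.pySetD fs tv (PySem.List.pyGetD fs tv 0 + 1)) freqs
  let e_freq : Int := PySem.List.pyGetD freqs 4 0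
  let t_freq : Int := PySem.List.pyGetD freqs 19 0
  let a_freq : Int := PySem.List.pyGetD freqs 0 0
  e_freq * 100 + t_freq * 90 + a_freq * 80

-- ===== PORT B =====
-- _WEIGHTS = [80,0,0,0,100] + [0]*14 + [90] + [0]*6
def pvWeights : List Int :=
  [80, 0, 0, 0, 100] ++ List.replicate 14 0 ++ [90] ++ List.replicate 6 0

def frequency_score_alt (text : List Int) : Int :=
  text.foldl (fun score tv => score + PySem.List.pyGetD pvWeights tv 0) 0

-- ===== PRECONDITION & SPEC =====
-- Pre_ excludes exactly the inputs where A raises IndexError (freqs[tv] with tv outside -26..25).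
def Pre_frequency_score (text : List Int) : Prop := ∀ tv ∈ text, -26 ≤ tv ∧ tv < 26
instance (text : List Int) : Decidable (Pre_frequency_score text) := by
  unfold Pre_frequency_score; infer_instance
def pvWitness_frequency_score : List Int := [4, -22, 19, 0]

def Spec_frequency_score (text : List Int) (out : Int) : Prop := out = frequency_score_alt text
instance (text : List Int) (out : Int) : Decidable (Spec_frequency_score text out) := by
  unfold Spec_frequency_score; infer_instance

-- ===== CLAIM (what is proved, stated in full; the proofs are below) =====
def Claim_equal_frequency_score : Prop := ∀ (text : List Int), Dom_frequency_score text → Pre_frequency_score text → Spec_frequency_score text (frequency_score text)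

-- ===== LEMMAS AND PROOFS =====

-- the weighted read-out A performs on a frequency table
def pvG (fs : List Int) : Int :=
  PySem.List.pyGetD fs 4 0 * 100 + PySem.List.pyGetD fs 19 0 * 90 + PySem.List.pyGetD fs 0 0 * 80

lemma pvIdx_eq (tv : Int) (h1 : -26 ≤ tv) (h2 : tv < 26) :
    PySem.List.pyIdx? 26 tv = some (if 0 ≤ tv then tv.toNat else 26 - (-tv).toNat) := by
  simp [PySem.List.pyIdx?]
  split_ifs <;> simp_all <;> omega

lemma pvStep_g (fs : List Int) (h26 : fs.length = 26) (tv : Int)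
    (h1 : -26 ≤ tv) (h2 : tv < 26) :
    pvG (PySem.List.pySetD fs tv (PySem.List.pyGetD fs tv 0 + 1)) =
      pvG fs + PySem.List.pyGetD pvWeights tv 0 := by
  have hidx := pvIdx_eq tv h1 h2
  set k : Nat := if 0 ≤ tv then tv.toNat else 26 - (-tv).toNat with hk
  have hklt : k < 26 := by rw [hk]; split_ifs <;> omega
  have hget : PySem.List.pyGetD fs tv 0 = fs.getD k 0 := by
    simp [PySem.List.pyGetD, PySem.List.pyGet?, h26, hidx, List.getD, List.getElem?_eq_getElem (by omega : k < fs.length)]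
  have hset : PySem.List.pySetD fs tv (PySem.List.pyGetD fs tv 0 + 1) =
      fs.set k (fs.getD k 0 + 1) := by
    simp [PySem.List.pySetD, PySem.List.pySet?, h26, hidx, hget]
  have hw : PySem.List.pyGetD pvWeights tv 0 =
      (if k = 4 then 100 else if k = 19 then 90 else if k = 0 then 80 else 0 : Int) := by
    have h26w : pvWeights.length = 26 := by decide
    have : PySem.List.pyGetD pvWeights tv 0 = pvWeights.getD k 0 := by
      simp [PySem.List.pyGetD, PySem.List.pyGet?, h26w, hidx, List.getD,
        List.getElem?_eq_getElem (by omega : k < pvWeights.length)]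
    rw [this]
    interval_cases k <;> decide
  rw [hset, hw]
  unfold pvG
  have hgd : ∀ (m : Nat), m < 26 →
      PySem.List.pyGetD (fs.set k (fs.getD k 0 + 1)) (m : Int) 0 =
        if k = m then fs.getD k 0 + 1 else PySem.List.pyGetD fs (m : Int) 0 := by
    intro m hm
    have hlen : (fs.set k (fs.getD k 0 + 1)).length = 26 := by simp [h26]
    simp [PySem.List.pyGetD_natCast, List.getD,
      List.getElem?_eq_getElem (by omega : m < fs.length)]
    split_ifs <;> simp_all
  have h4 := hgd 4 (by omega)
  have h19 := hgd 19 (by omega)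
  have h0 := hgd 0 (by omega)
  norm_num at h4 h19 h0 ⊢
  rw [h4, h19, h0]
  have hc : ∀ (m : Nat), PySem.List.pyGetD fs (m : Int) 0 = fs[m]?.getD 0 := by
    intro m
    simp [PySem.List.pyGetD_natCast, List.getD]
  have c4 := hc 4
  have c19 := hc 19
  have c0 := hc 0
  norm_num at c4 c19 c0
  rw [c4, c19, c0]
  clear hidx hset hw hgd h4 h19 h0 hc c4 c19 c0 hget hk h26 h1 h2
  split_ifs <;> simp_all <;> ring

lemma pvLen_step (fs : List Int) (tv v : Int) :
    (PySem.List.pySetD fs tv v).length = fs.length := by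
  simp [PySem.List.pySetD, PySem.List.pySet?]
  cases h : PySem.List.pyIdx? fs.length tv <;> simp

lemma pvMain (text : List Int) : ∀ (fs : List Int), fs.length = 26 →
    (∀ tv ∈ text, -26 ≤ tv ∧ tv < 26) →
    pvG (text.foldl (fun fs tv => PySem.List.pySetD fs tv (PySem.List.pyGetD fs tv 0 + 1)) fs) =
      pvG fs + (text.map (fun tv => PySem.List.pyGetD pvWeights tv 0)).sum := by
  induction text with
  | nil => intro fs _ _; simp
  | cons tv rest ih =>
    intro fs h26 hpre
    have h := hpre tv (by simp)
    simp only [List.foldl_cons, List.map_cons, List.sum_cons]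
    rw [ih _ (by rw [pvLen_step, h26]) (fun x hx => hpre x (by simp [hx])),
      pvStep_g fs h26 tv h.1 h.2]
    ring

-- ===== VERDICT (by name: the statement is the Claim_ definition above) =====
theorem frequency_score_spec : Claim_equal_frequency_score := by
  intro text _ hpre
  unfold Spec_frequency_score frequency_score frequency_score_alt
  have hz : (PySem.List.pyRange 0 26 1).foldl (fun fs _ => fs ++ [(0 : Int)]) [] =
      List.replicate 26 0 := by decide
  rw [hz]
  have := pvMain text (List.replicate 26 0) (by simp) hpre
  rw [PySem.List.foldl_add]
  have hg0 : pvG (List.replicate 26 (0 : Int)) = 0 := by decide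
  show pvG _ = _
  rw [this, hg0]
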